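-- pv_equiv track=rewrite | github.com/o28o/dg | scripts/telegram_bot/main.py | uniCoder
-- ===== SOURCE A (Python) =====
-- def uniCoder(text):
--     if not text:
--         return text
--     replacements = [
--         ("aa", "ā"), ("ii", "ī"), ("uu", "ū"),
--         ('"n', "ṅ"), ("~n", "ñ"),
--         (".t", "ṭ"), (".d", "ḍ"), (".n", "ṇ"),
--         (".m", "ṃ"), (".l", "ḷ"), (".h", "ḥ")
--     ]
--     for pattern, repl in replacements:
--         text = text.replace(pattern, repl)
--     return text
-- ===== SOURCE B (Python) =====
-- REP = {
--     ("a", "a"): "\u0101", ("i", "i"): "\u012b", ("u", "u"): "\u016b",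
--     ('"', "n"): "\u1e45", ("~", "n"): "\u00f1",
--     (".", "t"): "\u1e6d", (".", "d"): "\u1e0d", (".", "n"): "\u1e47",
--     (".", "m"): "\u1e43", (".", "l"): "\u1e37", (".", "h"): "\u1e25",
-- }
--
--
-- def uniCoder(text):
--     if not text:
--         return text
--     out = []
--     i = 0
--     n = len(text)
--     while i < n:
--         if i + 1 < n and (text[i], text[i + 1]) in REP:
--             out.append(REP[(text[i], text[i + 1])])
--             i += 2
--         else:
--             out.append(text[i])
--             i += 1
--     return "".join(out)
-- ===== Notes on version B (the rewrite author's own statement) =====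
-- stated objective: faster
-- what changed: Replaced the 11 sequential full-string str.replace passes by one left-to-right greedy scan with a digraph dictionary, building the output in a single pass.
import Mathlib
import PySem

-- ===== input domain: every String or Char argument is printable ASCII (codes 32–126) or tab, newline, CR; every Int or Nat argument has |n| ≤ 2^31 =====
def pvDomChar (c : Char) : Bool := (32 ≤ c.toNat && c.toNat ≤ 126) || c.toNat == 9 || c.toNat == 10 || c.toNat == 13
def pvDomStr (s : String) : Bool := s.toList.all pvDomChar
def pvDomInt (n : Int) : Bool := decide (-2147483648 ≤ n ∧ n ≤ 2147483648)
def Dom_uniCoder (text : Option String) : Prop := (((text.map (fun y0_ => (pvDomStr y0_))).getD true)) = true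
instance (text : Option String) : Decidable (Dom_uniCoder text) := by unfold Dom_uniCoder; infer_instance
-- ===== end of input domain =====

-- B replaces A's 11 sequential full-string str.replace passes with one left-to-right greedy
-- dictionary-driven scan (a single pass over the string); same return value everywhere.

-- ===== PORT A =====
def uniCoder (text : Option String) : Option String :=
  match text with
  | none => none
  | some s =>
    if s = "" then some s
    else
      some (([("aa", "ā"), ("ii", "ī"), ("uu", "ū"),
               ("\"n", "ṅ"), ("~n", "ñ"),
               (".t", "ṭ"), (".d", "ḍ"), (".n", "ṇ"),
               (".m", "ṃ"), (".l", "ḷ"), (".h", "ḥ")] : List (String × String)).foldl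
        (fun t pr => PySem.Str.replace t pr.1 pr.2) s)

-- ===== PORT B =====
-- the dict REP of Source B, as an association list keyed by the character pair
def uniMap : List ((Char × Char) × Char) :=
  [(('a','a'),'ā'), (('i','i'),'ī'), (('u','u'),'ū'),
   (('"','n'),'ṅ'), (('~','n'),'ñ'),
   (('.','t'),'ṭ'), (('.','d'),'ḍ'), (('.','n'),'ṇ'),
   (('.','m'),'ṃ'), (('.','l'),'ḷ'), (('.','h'),'ḥ')]

-- Source B's while-loop: one greedy left-to-right scan, advancing by 2 on a digraph hit
def uniScan : List Char → List Char
  | [] => []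
  | [c] => [c]
  | c1 :: c2 :: t =>
    match List.lookup (c1, c2) uniMap with
    | some r => r :: uniScan t
    | none => c1 :: uniScan (c2 :: t)
termination_by l => l.length

def uniCoder_alt (text : Option String) : Option String :=
  match text with
  | none => none
  | some s =>
    if s = "" then some s
    else some (String.ofList (uniScan s.toList))

-- ===== PRECONDITION & SPEC =====
def Spec_uniCoder (text : Option String) (out : Option String) : Prop := out = uniCoder_alt text
instance (text : Option String) (out : Option String) : Decidable (Spec_uniCoder text out) := by unfold Spec_uniCoder; infer_instance

-- ===== CLAIM (what is proved, stated in full; the proofs are below) =====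
def Claim_equal_uniCoder : Prop := ∀ (text : Option String), Dom_uniCoder text → Spec_uniCoder text (uniCoder text)

-- ===== LEMMAS AND PROOFS =====

-- one str.replace pass with a 2-char pattern and a 1-char replacement, in recursive form
def rep2 (a b r : Char) : List Char → List Char
  | [] => []
  | [c] => [c]
  | c1 :: c2 :: t =>
    if c1 = a ∧ c2 = b then r :: rep2 a b r t else c1 :: rep2 a b r (c2 :: t)

-- sequential application of a pattern list, mirroring A's foldl of str.replace
def applyAll (ps : List ((Char × Char) × Char)) (l : List Char) : List Char :=
  ps.foldl (fun acc p => rep2 p.1.1 p.1.2 p.2 acc) l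

def replChars : List Char := uniMap.map (·.2)

theorem go_spec (a b r : Char) :
    ∀ (fuel : Nat) (l acc : List Char), l.length ≤ fuel →
      PySem.Chars.replace.go [a, b] [r] fuel l acc = acc.reverse ++ rep2 a b r l := by
  intro fuel
  induction fuel with
  | zero =>
    intro l acc h
    have : l = [] := List.eq_nil_of_length_eq_zero (Nat.le_zero.mp h)
    subst this
    rw [PySem.Chars.replace.go.eq_def]
    simp [rep2]
  | succ n ih =>
    intro l acc h
    cases l with
    | nil => rw [PySem.Chars.replace.go.eq_def]; simp [rep2]
    | cons c t =>
      cases t with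
      | nil =>
        rw [PySem.Chars.replace.go.eq_def]
        have hp : List.isPrefixOf [a, b] [c] = false := by
          simp [List.isPrefixOf]
        have h0 : ([] : List Char).length ≤ n := by simp
        simp [hp, ih _ _ h0, rep2]
      | cons c2 t2 =>
        have hlen : t2.length ≤ n := by simp at h; omega
        have hlen2 : (c2 :: t2).length ≤ n := by simp at h ⊢; omega
        rw [PySem.Chars.replace.go.eq_def]
        by_cases hab : c = a ∧ c2 = b
        · obtain ⟨rfl, rfl⟩ := hab
          have hp : List.isPrefixOf [c, c2] (c :: c2 :: t2) = true := by
            simp [List.isPrefixOf]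
          simp [hp, ih _ _ hlen, rep2]
        · have hp : List.isPrefixOf [a, b] (c :: c2 :: t2) = false := by
            apply Bool.eq_false_iff.mpr
            intro hc
            rcases List.isPrefixOf_iff_prefix.mp hc with ⟨u, hu⟩
            injection hu with e1 hu2
            injection hu2 with e2 _
            exact hab ⟨e1.symm, e2.symm⟩
          simp [hp, ih _ _ hlen2, rep2, hab]

theorem replace_eq_rep2 (a b r : Char) (l : List Char) :
    PySem.Chars.replace l [a, b] [r] = rep2 a b r l := by
  have h := go_spec a b r l.length l [] le_rfl
  simpa [PySem.Chars.replace] using h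

theorem rep2_nil (a b r : Char) : rep2 a b r [] = [] := rfl

theorem rep2_cons_of_ne_first (a b r c : Char) (X : List Char) (h : c ≠ a) :
    rep2 a b r (c :: X) = c :: rep2 a b r X := by
  cases X with
  | nil => rfl
  | cons x t =>
    have hnot : ¬(c = a ∧ x = b) := fun hc => h hc.1
    simp [rep2, hnot]

theorem rep2_cons_of_not (a b r c : Char) (X : List Char)
    (h : ∀ h' t', X = h' :: t' → ¬(c = a ∧ h' = b)) :
    rep2 a b r (c :: X) = c :: rep2 a b r X := by
  cases X with
  | nil => rfl
  | cons x t => simp [rep2, h x t rfl]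

def headOk (c : Char) : List Char → Prop
  | [] => True
  | h :: _ => h = c ∨ h ∈ replChars

theorem headOk_rep2 (a b r c : Char) (hr : r ∈ replChars) (X : List Char)
    (h : headOk c X) : headOk c (rep2 a b r X) := by
  match X with
  | [] => exact h
  | [x] => exact h
  | x1 :: x2 :: t =>
    by_cases hc : x1 = a ∧ x2 = b
    · simp only [rep2, if_pos hc]; exact Or.inr hr
    · simp only [rep2, if_neg hc]; exact h

-- concrete facts about the pattern table, checked by decide
theorem uniMap_repl : ∀ q ∈ uniMap, q.2 ∈ replChars := by decide
theorem uniMap_first_ne_second : ∀ q ∈ uniMap, ∀ q' ∈ uniMap, q.1.1 = q'.1.2 → q = q' := by decide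
theorem uniMap_repl_ne : ∀ q ∈ uniMap, ∀ x ∈ replChars, x ≠ q.1.1 ∧ x ≠ q.1.2 := by
  intro q hq x hx
  fin_cases hq <;> fin_cases hx <;> exact ⟨by decide, by decide⟩

theorem lookup_mem {k : Char × Char} {v : Char} :
    ∀ {ps : List ((Char × Char) × Char)}, List.lookup k ps = some v → (k, v) ∈ ps := by
  intro ps
  induction ps with
  | nil => intro h; simp [List.lookup] at h
  | cons p ps ih =>
    obtain ⟨pk, pv⟩ := p
    intro h
    by_cases hk : k = pk
    · subst hk
      simp [List.lookup] at h
      simp [h]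
    · have hk' : (k == pk) = false := beq_eq_false_iff_ne.mpr hk
      simp [List.lookup, hk'] at h
      exact List.mem_cons_of_mem _ (ih h)

theorem applyAll_nil (ps : List ((Char × Char) × Char)) : applyAll ps [] = [] := by
  induction ps with
  | nil => rfl
  | cons p ps ih => simpa [applyAll, rep2_nil] using ih

theorem applyAll_singleton (ps : List ((Char × Char) × Char)) (c : Char) :
    applyAll ps [c] = [c] := by
  induction ps with
  | nil => rfl
  | cons p ps ih => simpa [applyAll, rep2] using ih

theorem applyAll_pass_repl (ps : List ((Char × Char) × Char)) (x : Char)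
    (hx : ∀ q ∈ ps, x ≠ q.1.1) :
    ∀ (X : List Char), applyAll ps (x :: X) = x :: applyAll ps X := by
  induction ps with
  | nil => intro X; rfl
  | cons p ps ih =>
    intro X
    have h1 : rep2 p.1.1 p.1.2 p.2 (x :: X) = x :: rep2 p.1.1 p.1.2 p.2 X :=
      rep2_cons_of_ne_first _ _ _ _ _ (hx p (by simp))
    simp only [applyAll, List.foldl_cons] at *
    rw [h1]
    exact ih (fun q hq => hx q (by simp [hq])) _

theorem applyAll_match (c1 c2 r : Char) :
    ∀ (ps : List ((Char × Char) × Char)), (∀ q ∈ ps, q ∈ uniMap) →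
      List.lookup (c1, c2) ps = some r →
      ∀ (X : List Char), applyAll ps (c1 :: c2 :: X) = r :: applyAll ps X := by
  intro ps
  induction ps with
  | nil => intro _ h; simp [List.lookup] at h
  | cons p ps ih =>
    obtain ⟨⟨pa, pb⟩, pr⟩ := p
    intro hsub hl X
    by_cases hk : (c1, c2) = (pa, pb)
    · rw [Prod.mk.injEq] at hk
      obtain ⟨rfl, rfl⟩ := hk
      have hr : pr = r := by simpa [List.lookup] using hl
      have hmem : ((c1, c2), pr) ∈ uniMap := hsub _ (by simp)
      have hrr : pr ∈ replChars := uniMap_repl _ hmem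
      have e1 : rep2 c1 c2 pr (c1 :: c2 :: X) = pr :: rep2 c1 c2 pr X := by
        simp [rep2]
      simp only [applyAll, List.foldl_cons]
      rw [e1, ← hr]
      exact applyAll_pass_repl ps pr
        (fun q hq => (uniMap_repl_ne q (hsub q (by simp [hq])) pr hrr).1) _
    · have hk' : ((c1, c2) == (pa, pb)) = false := beq_eq_false_iff_ne.mpr hk
      have hl' : List.lookup (c1, c2) ps = some r := by
        simpa [List.lookup, hk'] using hl
      have hqmem : ((c1, c2), r) ∈ ps := lookup_mem hl'
      have hpmem : ((pa, pb), pr) ∈ uniMap := hsub _ (by simp)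
      have hqmemU : ((c1, c2), r) ∈ uniMap := hsub _ (List.mem_cons_of_mem _ hqmem)
      have hpa : pa ≠ c2 := by
        intro e
        have heq := uniMap_first_ne_second _ hpmem _ hqmemU (by simpa using e)
        exact hk (congrArg Prod.fst heq).symm
      have e1 : rep2 pa pb pr (c1 :: c2 :: X) = c1 :: c2 :: rep2 pa pb pr X := by
        have hc : ¬(c1 = pa ∧ c2 = pb) := fun hcc => hk (by simp [hcc.1, hcc.2])
        rw [show rep2 pa pb pr (c1 :: c2 :: X) = c1 :: rep2 pa pb pr (c2 :: X) from by
              simp [rep2, hc]]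
        rw [rep2_cons_of_ne_first _ _ _ _ _ (fun e => hpa e.symm)]
      simp only [applyAll, List.foldl_cons]
      rw [e1]
      exact ih (fun q hq => hsub q (by simp [hq])) hl' _

theorem applyAll_skip (c1 c2 : Char) :
    ∀ (ps : List ((Char × Char) × Char)), (∀ q ∈ ps, q ∈ uniMap) →
      List.lookup (c1, c2) ps = none →
      ∀ (X : List Char), headOk c2 X → applyAll ps (c1 :: X) = c1 :: applyAll ps X := by
  intro ps
  induction ps with
  | nil => intro _ _ X _; rfl
  | cons p ps ih =>
    obtain ⟨⟨pa, pb⟩, pr⟩ := p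
    intro hsub hl X hX
    have hk' : ((c1, c2) == (pa, pb)) = false := by
      cases hbeq : ((c1, c2) == (pa, pb)) with
      | false => rfl
      | true => simp [List.lookup, hbeq] at hl
    have hl' : List.lookup (c1, c2) ps = none := by simpa [List.lookup, hk'] using hl
    have hkne : ¬(c1 = pa ∧ c2 = pb) := fun hcc =>
      (beq_eq_false_iff_ne.mp hk') (by simp [hcc.1, hcc.2])
    have hpmem : ((pa, pb), pr) ∈ uniMap := hsub _ (by simp)
    have e1 : rep2 pa pb pr (c1 :: X) = c1 :: rep2 pa pb pr X := by
      apply rep2_cons_of_not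
      intro h' t' hXe hcc
      subst hXe
      rcases hX with hh | hh
      · exact hkne ⟨hcc.1, hh ▸ hcc.2⟩
      · exact (uniMap_repl_ne _ hpmem h' hh).2 hcc.2
    simp only [applyAll, List.foldl_cons]
    rw [e1]
    exact ih (fun q hq => hsub q (by simp [hq])) hl' _
      (headOk_rep2 _ _ _ _ (uniMap_repl _ hpmem) _ hX)

theorem applyAll_eq_uniScan : ∀ l, applyAll uniMap l = uniScan l := by
  intro l
  induction l using uniScan.induct with
  | case1 => simp [applyAll_nil, uniScan]
  | case2 c => simp [applyAll_singleton, uniScan]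
  | case3 c1 c2 t r hl ih =>
    rw [applyAll_match c1 c2 r uniMap (fun q h => h) hl]
    rw [uniScan, hl, ih]
  | case4 c1 c2 t hl ih =>
    rw [applyAll_skip c1 c2 uniMap (fun q h => h) hl (c2 :: t) (Or.inl rfl)]
    rw [uniScan, hl, ih]

theorem foldA_toList (s : String) :
    (([("aa", "ā"), ("ii", "ī"), ("uu", "ū"),
        ("\"n", "ṅ"), ("~n", "ñ"),
        (".t", "ṭ"), (".d", "ḍ"), (".n", "ṇ"),
        (".m", "ṃ"), (".l", "ḷ"), (".h", "ḥ")] : List (String × String)).foldl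
      (fun t pr => PySem.Str.replace t pr.1 pr.2) s).toList = applyAll uniMap s.toList := by
  simp only [List.foldl_cons, List.foldl_nil]
  simp only [PySem.Str.toList_replace]
  simp only [show ("aa" : String).toList = ['a','a'] from rfl,
             show ("ii" : String).toList = ['i','i'] from rfl,
             show ("uu" : String).toList = ['u','u'] from rfl,
             show ("\"n" : String).toList = ['"','n'] from rfl,
             show ("~n" : String).toList = ['~','n'] from rfl,
             show (".t" : String).toList = ['.','t'] from rfl,
             show (".d" : String).toList = ['.','d'] from rfl,
             show (".n" : String).toList = ['.','n'] from rfl,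
             show (".m" : String).toList = ['.','m'] from rfl,
             show (".l" : String).toList = ['.','l'] from rfl,
             show (".h" : String).toList = ['.','h'] from rfl,
             show ("ā" : String).toList = ['ā'] from rfl,
             show ("ī" : String).toList = ['ī'] from rfl,
             show ("ū" : String).toList = ['ū'] from rfl,
             show ("ṅ" : String).toList = ['ṅ'] from rfl,
             show ("ñ" : String).toList = ['ñ'] from rfl,
             show ("ṭ" : String).toList = ['ṭ'] from rfl,
             show ("ḍ" : String).toList = ['ḍ'] from rfl,
             show ("ṇ" : String).toList = ['ṇ'] from rfl,
             show ("ṃ" : String).toList = ['ṃ'] from rfl,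
             show ("ḷ" : String).toList = ['ḷ'] from rfl,
             show ("ḥ" : String).toList = ['ḥ'] from rfl]
  simp only [replace_eq_rep2]
  simp only [applyAll, uniMap, List.foldl_cons, List.foldl_nil]

-- ===== VERDICT (by name: the statement is the Claim_ definition above) =====
theorem uniCoder_spec : Claim_equal_uniCoder := by
  intro text _
  show uniCoder text = uniCoder_alt text
  cases text with
  | none => rfl
  | some s =>
    by_cases hs : s = ""
    · simp [uniCoder, uniCoder_alt, hs]
    · simp only [uniCoder, uniCoder_alt, hs, if_false, Option.some.injEq]
      apply String.toList_inj.mp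
      rw [foldA_toList, applyAll_eq_uniScan]
      simp
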